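-- pv_equiv track=rewrite | github.com/MengSunDom/CITS5206 | backend/game/bridge_auction_validator.py | format_auction_history
-- ===== SOURCE A (Python) =====
-- from typing import Dict, List, Optional, Tuple
--
-- def create_auction_grid(dealer_seat: str, history: List[Dict]) -> List[List[Optional[Dict]]]:
--     """Create a properly formatted auction grid with dealer offset
--
--     Args:
--         dealer_seat: The dealer position (W, N, E, S)
--         history: List of calls in chronological order
--
--     Returns:
--         2D grid with rows and columns for W-N-E-S layout
--     """
--     cols = ['W', 'N', 'E', 'S']
--     start_col = cols.index(dealer_seat)
--
--     # Calculate number of rows needed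
--     total_calls = len(history)
--     num_rows = max(1, (start_col + total_calls + 3) // 4)
--
--     # Initialize grid
--     grid = []
--     for _ in range(num_rows):
--         grid.append([None, None, None, None])
--
--     # Place each call in the grid
--     for i, call in enumerate(history):
--         abs_index = start_col + i
--         row = abs_index // 4
--         col = abs_index % 4
--         if row < len(grid):
--             grid[row][col] = call
--
--     return grid
--
-- def format_auction_history(dealer_seat: str, history: List[Dict]) -> str:
--     """Format auction history as a string table
--
--     Args:
--         dealer_seat: The dealer position
--         history: List of calls
--
--     Returns:
--         Formatted string representation of the auction
--     """
--     if not history: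
--         return f"No bids yet. Dealer: {dealer_seat} starts."
--
--     grid = create_auction_grid(dealer_seat, history)
--
--     # Build table string
--     lines = []
--     lines.append("| W | N | E | S |")
--     lines.append("|---|---|---|---|")
--
--     for row in grid:
--         row_str = "|"
--         for cell in row:
--             if cell:
--                 call_str = cell.get('call', '')
--                 # Add alert indicator if present
--                 if cell.get('alert'):
--                     call_str += '*'
--                 row_str += f" {call_str:^3} |"
--             else:
--                 row_str += "     |"
--         lines.append(row_str)
--
--     return "\n".join(lines)
-- ===== SOURCE B (Python) =====
-- def format_auction_history(dealer_seat, history):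
--     if not history:
--         return f"No bids yet. Dealer: {dealer_seat} starts."
--     start_col = ['W', 'N', 'E', 'S'].index(dealer_seat)
--     cells = [None] * start_col + list(history)
--     cells += [None] * (-len(cells) % 4)
--     lines = ["| W | N | E | S |", "|---|---|---|---|"]
--     for i in range(0, len(cells), 4):
--         row_str = "|"
--         for cell in cells[i:i + 4]:
--             if cell:
--                 call_str = cell.get('call', '')
--                 if cell.get('alert'):
--                     call_str += '*'
--                 row_str += f" {call_str:^3} |"
--             else:
--                 row_str += "     |"
--         lines.append(row_str)
--     return "\n".join(lines)
-- ===== Notes on version B (the rewrite author's own statement) =====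
-- stated objective: simpler
-- what changed: Replaces the create_auction_grid helper (row-count computation, [None]*4 grid pre-allocation and index-arithmetic placement of each call) by a flat padded cell list built with list concatenation and formatted in slices of 4.
import Mathlib
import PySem

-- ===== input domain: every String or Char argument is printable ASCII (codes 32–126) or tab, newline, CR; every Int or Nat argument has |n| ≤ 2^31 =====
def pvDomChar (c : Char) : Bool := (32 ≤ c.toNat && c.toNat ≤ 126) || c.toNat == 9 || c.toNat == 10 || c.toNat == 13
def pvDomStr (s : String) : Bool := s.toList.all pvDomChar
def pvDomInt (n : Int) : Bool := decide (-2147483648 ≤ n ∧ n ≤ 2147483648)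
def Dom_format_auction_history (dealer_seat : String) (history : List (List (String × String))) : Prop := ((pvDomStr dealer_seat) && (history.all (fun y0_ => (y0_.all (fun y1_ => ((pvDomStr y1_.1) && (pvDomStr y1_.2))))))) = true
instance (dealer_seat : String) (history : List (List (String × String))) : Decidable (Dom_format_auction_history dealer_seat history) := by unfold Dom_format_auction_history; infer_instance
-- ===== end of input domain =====

-- B replaces the grid-building helper by a flat padded cell list formatted in slices of 4 (objective: simpler).
-- A dict is ported as List (String × String) (insertion order, first-match lookup).

-- Python's `f"{s:^3}"`: centre in width 3, the extra pad character on the right (exact for width 3).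
def pvCenter3 (s : String) : String :=
  let n := s.toList.length
  if 3 ≤ n then s
  else
    let pad := 3 - n
    let l := pad / 2
    String.ofList (List.replicate l ' ') ++ s ++ String.ofList (List.replicate (pad - l) ' ')

-- the identical inner cell formatting of both A and B: `if cell:` (None/empty-dict falsy),
-- cell.get('call',''), '*' when cell.get('alert') is truthy (present and non-empty), then `f" {call_str:^3} |"`.
def pvFormatCell (cell : Option (List (String × String))) : String :=
  match cell with
  | none => "     |"
  | some c =>
    if c = [] then "     |"
    else
      let call_str := PySem.Dict.getD ⟨c⟩ "call" ""
      let call_str := if ((PySem.Dict.get? (⟨c⟩ : PySem.Dict String String) "alert").getD "") ≠ "" then call_str ++ "*" else call_str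
      " " ++ pvCenter3 call_str ++ " |"

-- the inner `for cell in row` loop of both A and B, accumulating onto "|"
def pvRowStr (row : List (Option (List (String × String)))) : String :=
  row.foldl (fun acc cell => acc ++ pvFormatCell cell) "|"

-- ===== PORT A =====
def create_auction_grid (dealer_seat : String) (history : List (List (String × String))) :
    Option (List (List (Option (List (String × String))))) :=
  match PySem.List.index? ["W", "N", "E", "S"] dealer_seat with
  | none => none  -- cols.index raises ValueError (excluded by Pre_)
  | some start_col =>
    let total : Int := history.length
    let num_rows : Int := max 1 (PySem.Int.floordiv ((start_col : Int) + total + 3) 4)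
    let grid : List (List (Option (List (String × String)))) :=
      List.replicate num_rows.toNat [none, none, none, none]
    some ((PySem.List.enumerate history).foldl (fun g p =>
      let abs_index : Int := (start_col : Int) + p.1
      let row := PySem.Int.floordiv abs_index 4
      let col := PySem.Int.mod abs_index 4
      if row < (g.length : Int) then g.modify row.toNat (fun r => r.set col.toNat (some p.2)) else g) grid)

def format_auction_history (dealer_seat : String) (history : List (List (String × String))) : String :=
  if history = [] then "No bids yet. Dealer: " ++ dealer_seat ++ " starts."
  else
    match create_auction_grid dealer_seat history with
    | none => ""  -- unreachable under Pre_ (Python raises ValueError)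
    | some grid =>
      let lines := grid.foldl (fun ls row => ls ++ [pvRowStr row])
        ["| W | N | E | S |", "|---|---|---|---|"]
      PySem.Str.join "\n" lines

-- ===== PORT B =====
def format_auction_history_alt (dealer_seat : String) (history : List (List (String × String))) : String :=
  if history = [] then "No bids yet. Dealer: " ++ dealer_seat ++ " starts."
  else
    match PySem.List.index? ["W", "N", "E", "S"] dealer_seat with
    | none => ""  -- .index raises ValueError (excluded by Pre_)
    | some start_col =>
      let cells : List (Option (List (String × String))) :=
        List.replicate start_col none ++ history.map some
      let cells := cells ++ List.replicate (PySem.Int.mod (-(cells.length : Int)) 4).toNat none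
      let lines := (PySem.List.pyRange 0 (cells.length : Int) 4).foldl
        (fun ls i => ls ++ [pvRowStr (PySem.List.slice cells (some i) (some (i + 4)))])
        ["| W | N | E | S |", "|---|---|---|---|"]
      PySem.Str.join "\n" lines

-- ===== PRECONDITION & SPEC =====
-- Pre_ excludes exactly the inputs where Python A raises ValueError: a dealer_seat outside
-- {'W','N','E','S'} together with a non-empty history (cols.index; with empty history A returns early).
def Pre_format_auction_history (dealer_seat : String) (history : List (List (String × String))) : Prop :=
  history = [] ∨ dealer_seat ∈ (["W", "N", "E", "S"] : List String)
instance (dealer_seat : String) (history : List (List (String × String))) : Decidable (Pre_format_auction_history dealer_seat history) := by unfold Pre_format_auction_history; infer_instance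

def pvWitness_format_auction_history : String × (List (List (String × String))) :=
  ("N", [[("call", "1C")], [("call", "P"), ("alert", "x")]])

def Spec_format_auction_history (dealer_seat : String) (history : List (List (String × String))) (out : String) : Prop := out = format_auction_history_alt dealer_seat history
instance (dealer_seat : String) (history : List (List (String × String))) (out : String) : Decidable (Spec_format_auction_history dealer_seat history out) := by unfold Spec_format_auction_history; infer_instance

-- ===== CLAIM (what is proved, stated in full; the proofs are below) =====
def Claim_equal_format_auction_history : Prop := ∀ (dealer_seat : String) (history : List (List (String × String))), Dom_format_auction_history dealer_seat history → Pre_format_auction_history dealer_seat history → Spec_format_auction_history dealer_seat history (format_auction_history dealer_seat history)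

-- ===== LEMMAS AND PROOFS =====

-- proof-only helper: split a list into consecutive blocks of 4
def pvChunk4 {α : Type} (xs : List α) : List (List α) :=
  match xs with
  | [] => []
  | a :: l => (a :: l.take 3) :: pvChunk4 (l.drop 3)
termination_by xs.length
decreasing_by simp

-- proof-only helper: sequential overwrite, the flat meaning of A's placement loop
def pvOw {α : Type} (flat : List (Option α)) (p : Nat) (h : List α) : List (Option α) :=
  match h with
  | [] => flat
  | c :: h' => pvOw (flat.set p (some c)) (p + 1) h'

theorem pvChunk4_nil {α : Type} : pvChunk4 ([] : List α) = [] := by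
  rw [pvChunk4.eq_def]

theorem pvChunk4_cons4 {α : Type} (a b c d : α) (l : List α) :
    pvChunk4 (a :: b :: c :: d :: l) = [a, b, c, d] :: pvChunk4 l := by
  rw [pvChunk4.eq_def]
  simp

theorem pvCons4 {α : Type} (flat : List α) (h : 4 ≤ flat.length) :
    ∃ a b c d rest, flat = a :: b :: c :: d :: rest := by
  rcases flat with _ | ⟨a, flat⟩; · simp at h
  rcases flat with _ | ⟨b, flat⟩; · simp at h
  rcases flat with _ | ⟨c, flat⟩; · simp at h
  rcases flat with _ | ⟨d, flat⟩; · simp at h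
  exact ⟨a, b, c, d, flat, rfl⟩

theorem pvChunk4_len {α : Type} (m : Nat) :
    ∀ flat : List α, flat.length = 4 * m → (pvChunk4 flat).length = m := by
  induction m with
  | zero =>
    intro flat hlen
    obtain rfl : flat = [] := List.eq_nil_of_length_eq_zero (by omega)
    simp [pvChunk4_nil]
  | succ m ih =>
    intro flat hlen
    obtain ⟨a, b, c, d, rest, rfl⟩ := pvCons4 flat (by omega)
    have hrest : rest.length = 4 * m := by simp at hlen; omega
    rw [pvChunk4_cons4]
    simp [ih rest hrest]

theorem pvChunk4_replicate {α : Type} (r : Nat) :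
    pvChunk4 (List.replicate (4 * r) (none : Option α)) = List.replicate r [none, none, none, none] := by
  induction r with
  | zero => simp [pvChunk4_nil]
  | succ r ih =>
    rw [show 4 * (r + 1) = 4 + 4 * r by ring, List.replicate_add]
    rw [show (List.replicate 4 (none : Option α)) = none :: none :: none :: none :: [] from rfl]
    simp only [List.cons_append, List.nil_append]
    rw [pvChunk4_cons4, ih, List.replicate_succ]

theorem pvChunk4_modify {α : Type} (m : Nat) :
    ∀ (flat : List α) (q : Nat) (v : α), flat.length = 4 * m → q < flat.length →
    (pvChunk4 flat).modify (q / 4) (fun r => r.set (q % 4) v) = pvChunk4 (flat.set q v) := by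
  induction m with
  | zero => intro flat q v hlen hq; omega
  | succ m ih =>
    intro flat q v hlen hq
    obtain ⟨a, b, c, d, rest, rfl⟩ := pvCons4 flat (by omega)
    have hrest : rest.length = 4 * m := by simp at hlen; omega
    rw [pvChunk4_cons4]
    by_cases h4 : q < 4
    · rw [Nat.div_eq_of_lt h4, Nat.mod_eq_of_lt h4]
      interval_cases q <;> simp [List.modify, pvChunk4_cons4]
    · obtain ⟨q', rfl⟩ : ∃ q', q = q' + 4 := ⟨q - 4, by omega⟩
      rw [show (q' + 4) / 4 = q' / 4 + 1 by omega, show (q' + 4) % 4 = q' % 4 by omega]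
      have hq' : q' < rest.length := by simp at hq; omega
      have hset : (a :: b :: c :: d :: rest).set (q' + 4) v = a :: b :: c :: d :: rest.set q' v := by
        rw [show q' + 4 = q' + 3 + 1 by omega, List.set_cons_succ]
        rw [show q' + 3 = q' + 2 + 1 by omega, List.set_cons_succ]
        rw [show q' + 2 = q' + 1 + 1 by omega, List.set_cons_succ]
        rw [List.set_cons_succ]
      have hstep2 : ([a, b, c, d] :: pvChunk4 rest).modify (q' / 4 + 1) (fun r => r.set (q' % 4) v)
          = [a, b, c, d] :: (pvChunk4 rest).modify (q' / 4) (fun r => r.set (q' % 4) v) := by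
        simp [List.modify]
      rw [hstep2, ih rest q' v hrest hq', hset, pvChunk4_cons4]

theorem pvOw_spec {α : Type} (h : List α) :
    ∀ (pre : List (Option α)) (L : Nat), h.length ≤ L →
    pvOw (pre ++ List.replicate L none) pre.length h
      = pre ++ h.map some ++ List.replicate (L - h.length) (none : Option α) := by
  induction h with
  | nil => intro pre L _; simp [pvOw]
  | cons c h ih =>
    intro pre L hL
    have hL' : h.length + 1 ≤ L := by simpa using hL
    obtain ⟨L', rfl⟩ : ∃ L', L = L' + 1 := ⟨L - 1, by omega⟩
    rw [List.replicate_succ]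
    simp only [pvOw]
    have hset : (pre ++ none :: List.replicate L' none).set pre.length (some c)
        = (pre ++ [some c]) ++ List.replicate L' (none : Option α) := by
      rw [List.set_append, if_neg (lt_irrefl _), Nat.sub_self]
      simp
    rw [hset, show pre.length + 1 = (pre ++ [some c]).length by simp]
    rw [ih (pre ++ [some c]) L' (by omega)]
    simp [List.append_assoc]

theorem pvFold_place {α : Type} (k : Nat) (h : List α) :
    ∀ (flat : List (Option α)) (s : Nat), flat.length % 4 = 0 → k + s + h.length ≤ flat.length →
    (PySem.List.enumerate h ((s : Nat) : Int)).foldl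
      (fun g p =>
        let abs_index : Int := ((k : Nat) : Int) + p.1
        let row := PySem.Int.floordiv abs_index 4
        let col := PySem.Int.mod abs_index 4
        if row < (g.length : Int) then g.modify row.toNat (fun r => r.set col.toNat (some p.2)) else g)
      (pvChunk4 flat)
    = pvChunk4 (pvOw flat (k + s) h) := by
  induction h with
  | nil => intro flat s _ _; simp [PySem.List.enumerate, pvOw]
  | cons c h ih =>
    intro flat s hmod hle
    have hcons : PySem.List.enumerate (c :: h) ((s : Nat) : Int)
        = (((s : Nat) : Int), c) :: PySem.List.enumerate h (((s : Nat) : Int) + 1) := by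
      simp [PySem.List.enumerate]
    have hq : k + s < flat.length := by simp at hle; omega
    have hlenc : (pvChunk4 flat).length = flat.length / 4 :=
      pvChunk4_len (flat.length / 4) flat (by omega)
    have hrow : PySem.Int.floordiv (((k : Nat) : Int) + ((s : Nat) : Int)) 4 = (((k + s) / 4 : Nat) : Int) := by
      rw [PySem.Int.floordiv_eq_ediv_of_pos (by norm_num)]; omega
    have hcol : PySem.Int.mod (((k : Nat) : Int) + ((s : Nat) : Int)) 4 = (((k + s) % 4 : Nat) : Int) := by
      rw [PySem.Int.mod_eq_emod_of_pos (by norm_num)]; omega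
    have hguard : ((((k + s) / 4 : Nat) : Int) < ((pvChunk4 flat).length : Int)) = True := by
      simp only [hlenc, eq_iff_iff, iff_true]
      have : (k + s) / 4 < flat.length / 4 := by omega
      exact_mod_cast this
    rw [hcons, List.foldl_cons]
    simp only [hrow, hcol, hguard, if_true, Int.toNat_natCast]
    rw [pvChunk4_modify (flat.length / 4) flat (k + s) (some c) (by omega) hq]
    rw [show (((s : Nat) : Int) + 1) = (((s + 1 : Nat)) : Int) by push_cast; ring]
    rw [ih (flat.set (k + s) (some c)) (s + 1) (by simp [hmod]) (by simp at hle ⊢; omega)]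
    rw [show k + (s + 1) = k + s + 1 by omega]
    rfl

theorem pvMapSlice {α β : Type} (f : List α → β) (r : Nat) :
    ∀ cells : List α, cells.length = 4 * r →
    (List.range r).map (fun (j : Nat) => f (PySem.List.slice cells (some (4 * (j : Int))) (some (4 * (j : Int) + 4))))
      = (pvChunk4 cells).map f := by
  induction r with
  | zero =>
    intro cells hl
    obtain rfl : cells = [] := List.eq_nil_of_length_eq_zero (by omega)
    simp [pvChunk4_nil]
  | succ r ih =>
    intro cells hl
    obtain ⟨a, b, c, d, rest, rfl⟩ := pvCons4 cells (by omega)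
    have hrest : rest.length = 4 * r := by simp at hl; omega
    rw [pvChunk4_cons4, List.range_succ_eq_map, List.map_cons, List.map_map, List.map_cons]
    refine congrArg₂ List.cons ?_ ?_
    · rfl
    · rw [← ih rest hrest]
      apply List.map_congr_left
      intro j hj
      simp only [Function.comp_apply]
      congr 1
      rw [show (4 * ((j.succ : Nat) : Int)) = ((4 * j + 4 : Nat) : Int) by push_cast; ring,
          show (((4 * j + 4 : Nat) : Int) + 4) = ((4 * j + 4 + 4 : Nat) : Int) by push_cast; ring,
          PySem.List.slice_natCast,
          show (4 * (j : Int)) = ((4 * j : Nat) : Int) by push_cast; ring,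
          show (((4 * j : Nat) : Int) + 4) = ((4 * j + 4 : Nat) : Int) by push_cast; ring,
          PySem.List.slice_natCast]
      have hd : (a :: b :: c :: d :: rest).drop (4 * j + 4) = rest.drop (4 * j) := by
        rw [show 4 * j + 4 = 4 * j + 3 + 1 by omega, List.drop_succ_cons,
            show 4 * j + 3 = 4 * j + 2 + 1 by omega, List.drop_succ_cons,
            show 4 * j + 2 = 4 * j + 1 + 1 by omega, List.drop_succ_cons,
            List.drop_succ_cons]
      rw [hd, show 4 * j + 4 + 4 - (4 * j + 4) = 4 by omega, show 4 * j + 4 - 4 * j = 4 by omega]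

-- ===== VERDICT (by name: the statement is the Claim_ definition above) =====
theorem format_auction_history_spec : Claim_equal_format_auction_history := by
  intro d h hDom hPre
  simp only [Spec_format_auction_history]
  by_cases hh : h = []
  · subst hh; rfl
  · cases hidx : PySem.List.index? ["W", "N", "E", "S"] d with
    | none =>
      rcases hPre with h0 | hmem
      · exact absurd h0 hh
      · exact absurd hmem ((PySem.List.index?_eq_none_iff _ _).mp hidx)
    | some k =>
      have hn : 0 < h.length := List.length_pos_of_ne_nil hh
      obtain ⟨r, hrdef⟩ : ∃ r, r = (k + h.length + 3) / 4 := ⟨_, rfl⟩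
      have hr1 : 1 ≤ r := by omega
      have hkr : k + h.length ≤ 4 * r := by omega
      have h4r : k + h.length + (4 * r - (k + h.length)) = 4 * r := by omega
      -- A side
      simp only [format_auction_history, create_auction_grid, hidx]
      rw [if_neg hh]
      rw [show max 1 (PySem.Int.floordiv (((k : Nat) : Int) + ((h.length : Nat) : Int) + 3) 4) = ((r : Nat) : Int) from by
        rw [PySem.Int.floordiv_eq_ediv_of_pos (by norm_num)]
        rw [max_eq_right] <;> omega]
      simp only [Int.toNat_natCast]
      rw [show List.replicate r ([none, none, none, none] : List (Option (List (String × String)))) = pvChunk4 (List.replicate (4 * r) none) from (pvChunk4_replicate r).symm]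
      have hfold := pvFold_place k h (List.replicate (4 * r) (none : Option (List (String × String)))) 0
        (by simp only [List.length_replicate]; omega) (by simp only [List.length_replicate]; omega)
      simp only [Nat.cast_zero, Nat.add_zero] at hfold
      rw [hfold]
      have how := pvOw_spec h (List.replicate k (none : Option (List (String × String)))) (4 * r - k) (by omega)
      simp only [List.length_replicate] at how
      rw [show List.replicate k (none : Option (List (String × String))) ++ List.replicate (4 * r - k) none = List.replicate (4 * r) none from by
        rw [← List.replicate_add]; congr 1; omega] at how
      rw [how]
      rw [PySem.List.foldl_append_singleton_eq_map]
      -- B side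
      simp only [format_auction_history_alt, hidx]
      rw [if_neg hh]
      simp only [List.length_append, List.length_replicate, List.length_map]
      rw [show (PySem.Int.mod (-(((k + h.length : Nat)) : Int)) 4).toNat = 4 * r - (k + h.length) from by
        rw [PySem.Int.mod_eq_emod_of_pos (by norm_num)]; omega]
      rw [h4r]
      rw [PySem.List.pyRange_of_pos 0 (((4 * r : Nat)) : Int) (by norm_num)]
      rw [if_pos (by exact_mod_cast (by omega : 0 < 4 * r) : (0 : Int) < ((4 * r : Nat) : Int))]
      rw [show (((((4 * r : Nat)) : Int) - 0 + 4 - 1) / 4).toNat = r from by omega]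
      rw [PySem.List.foldl_append_singleton_eq_map]
      rw [List.map_map]
      simp only [Function.comp_def, zero_add]
      rw [pvMapSlice pvRowStr r ((List.replicate k none ++ List.map some h) ++ List.replicate (4 * r - (k + h.length)) none)
        (by simp only [List.length_append, List.length_replicate, List.length_map]; omega)]
      rw [show 4 * r - k - h.length = 4 * r - (k + h.length) by omega]
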